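-- pv_equiv track=rewrite | github.com/nandishjpatel/odemis | src/odemis/acq/stitching/_tiledacq.py | _sort_tile_indices_zigzag
-- ===== SOURCE A (Python) =====
-- from itertools import groupby
-- from typing import Dict, List, Optional, Tuple, Union
--
-- def _sort_tile_indices_zigzag(tile_indices: List[Tuple[int, int]]) -> List[Tuple[int, int]]:
--     """
--     Sort the given tile indices in a zigzag scanning order.
--     # Below is an example for a 5x3 tile grid:
--     # A-->-->-->--v
--     #             |
--     # v--<--<--<---
--     # |
--     # --->-->-->--Z
--     :param tile_indices: List of (int, int) tuples representing the tile indices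
--     :return: List of (int, int) tuples sorted in a zigzag scanning order
--     """
--     # Sort tile_indices by row first, then column
--     tile_indices.sort(key=lambda t: (t[1], t[0]))
--
--     # Group indices by rows and apply zigzag pattern
--     sorted_indices = []
--     for row, group in groupby(tile_indices, key=lambda t: t[1]):
--         group = list(group)
--         # Reverse the order of the group if the row is odd
--         if row % 2 == 1:
--             group.reverse()
--         sorted_indices.extend(group)
--
--     return sorted_indices
-- ===== SOURCE B (Python) =====
-- def _sort_tile_indices_zigzag(tile_indices):
--     # Single in-place sort with a composite key: row, then column ascending on
--     # even rows and descending (via negation) on odd rows.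
--     tile_indices.sort(key=lambda t: (t[1], t[0] if t[1] % 2 == 0 else -t[0]))
--     return tile_indices
-- ===== Notes on version B (the rewrite author's own statement) =====
-- stated objective: simpler
-- what changed: Replaced the sort-then-groupby-then-per-row-reverse pipeline with one in-place sort whose composite key (row, col on even rows / -col on odd rows) produces the zigzag order directly.
import Mathlib
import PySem

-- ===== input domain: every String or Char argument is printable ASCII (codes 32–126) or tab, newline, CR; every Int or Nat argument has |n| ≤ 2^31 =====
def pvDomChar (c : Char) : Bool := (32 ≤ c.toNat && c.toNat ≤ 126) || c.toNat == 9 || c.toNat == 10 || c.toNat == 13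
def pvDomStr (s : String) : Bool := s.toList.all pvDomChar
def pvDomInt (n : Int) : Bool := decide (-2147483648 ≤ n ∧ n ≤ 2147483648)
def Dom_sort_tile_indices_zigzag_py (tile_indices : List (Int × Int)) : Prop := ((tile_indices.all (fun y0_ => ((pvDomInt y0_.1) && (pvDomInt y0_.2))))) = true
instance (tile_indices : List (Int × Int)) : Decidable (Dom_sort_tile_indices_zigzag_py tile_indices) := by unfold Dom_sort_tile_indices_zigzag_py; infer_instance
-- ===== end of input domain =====

-- B replaces A's sort + groupby + per-row reverse with ONE sort on a composite key (simpler).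
-- Equivalence is about the RETURN value only: both Pythons sort the argument in place, but A
-- leaves it row-major sorted while B leaves it in zigzag order.

-- ===== PORT A =====
-- itertools.groupby(ts, key=lambda t: t[1]): maximal runs of consecutive equal keys (hand port, exact for this use)
def pvGroupRuns : List (Int × Int) → List (Int × List (Int × Int))
  | [] => []
  | x :: xs =>
    match pvGroupRuns xs with
    | [] => [(x.2, [x])]
    | (k, g) :: rest => if x.2 = k then (k, x :: g) :: rest else (x.2, [x]) :: (k, g) :: rest

def sort_tile_indices_zigzag_py (tile_indices : List (Int × Int)) : List (Int × Int) :=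
  -- tile_indices.sort(key=lambda t: (t[1], t[0]))
  let ts := PySem.List.sorted2 tile_indices (fun t => t.2) (fun t => t.1)
  -- for row, group in groupby(...): reverse the group if row % 2 == 1; sorted_indices.extend(group)
  (pvGroupRuns ts).foldl
    (fun acc rg => acc ++ (if PySem.Int.mod rg.1 2 = 1 then rg.2.reverse else rg.2)) []

-- ===== PORT B =====
def sort_tile_indices_zigzag_py_alt (tile_indices : List (Int × Int)) : List (Int × Int) :=
  -- tile_indices.sort(key=lambda t: (t[1], t[0] if t[1] % 2 == 0 else -t[0]))
  PySem.List.sorted2 tile_indices (fun t => t.2)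
    (fun t => if PySem.Int.mod t.2 2 = 0 then t.1 else -t.1)

-- ===== PRECONDITION & SPEC =====
def Spec_sort_tile_indices_zigzag_py (tile_indices : List (Int × Int)) (out : List (Int × Int)) : Prop := out = sort_tile_indices_zigzag_py_alt tile_indices
instance (tile_indices : List (Int × Int)) (out : List (Int × Int)) : Decidable (Spec_sort_tile_indices_zigzag_py tile_indices out) := by unfold Spec_sort_tile_indices_zigzag_py; infer_instance

-- ===== CLAIM (what is proved, stated in full; the proofs are below) =====
def Claim_equal_sort_tile_indices_zigzag_py : Prop := ∀ (tile_indices : List (Int × Int)), Dom_sort_tile_indices_zigzag_py tile_indices → Spec_sort_tile_indices_zigzag_py tile_indices (sort_tile_indices_zigzag_py tile_indices)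

-- ===== LEMMAS AND PROOFS =====

-- B's composite sort key, second component: col on even rows, -col on odd rows
def zsig (t : Int × Int) : Int := if PySem.Int.mod t.2 2 = 0 then t.1 else -t.1

-- the strict "before" relation of B's insertion sort (lexicographic on (row, zsig))
def zlt (a b : Int × Int) : Bool :=
  decide (a.2 < b.2) || (!decide (b.2 < a.2) && decide (zsig a < zsig b))

-- the strict "before" relation of A's row-major insertion sort
def rlt (a b : Int × Int) : Bool :=
  decide (a.2 < b.2) || (!decide (b.2 < a.2) && decide (a.1 < b.1))

-- zigzag order as a Prop
def Rz (a b : Int × Int) : Prop := a.2 < b.2 ∨ (a.2 = b.2 ∧ zsig a ≤ zsig b)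

lemma zlt_false_iff (a b : Int × Int) : zlt b a = false ↔ Rz a b := by
  simp [zlt, Rz]; omega

lemma rlt_false_iff (a b : Int × Int) :
    rlt b a = false ↔ (a.2 < b.2 ∨ (a.2 = b.2 ∧ a.1 ≤ b.1)) := by
  simp [rlt]; omega

lemma zlt_asym (a b : Int × Int) (h : zlt a b = true) : zlt b a = false := by
  simp [zlt] at h ⊢; omega

lemma zlt_trans (a b c : Int × Int) (h1 : zlt a b = true) (h2 : zlt b c = true) :
    zlt a c = true := by
  simp [zlt] at h1 h2 ⊢; omega

lemma rlt_asym (a b : Int × Int) (h : rlt a b = true) : rlt b a = false := by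
  simp [rlt] at h ⊢; omega

lemma rlt_trans (a b c : Int × Int) (h1 : rlt a b = true) (h2 : rlt b c = true) :
    rlt a c = true := by
  simp [rlt] at h1 h2 ⊢; omega

-- generic: inserting into a list sorted w.r.t. ¬ before-swap keeps it sorted
lemma insertBy_pairwise {α : Type} (before : α → α → Bool)
    (hasym : ∀ a b, before a b = true → before b a = false)
    (htrans : ∀ a b c, before a b = true → before b c = true → before a c = true)
    (x : α) (acc : List α) (h : acc.Pairwise (fun a b => before b a = false)) :
    (PySem.List.insertBy before x acc).Pairwise (fun a b => before b a = false) := by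
  induction acc with
  | nil => simp [PySem.List.insertBy]
  | cons y ys ih =>
    rcases List.pairwise_cons.mp h with ⟨hy, hys⟩
    by_cases hb : before x y = true
    · simp only [PySem.List.insertBy, hb, if_pos]
      refine List.pairwise_cons.mpr ⟨?_, h⟩
      intro z hz
      rcases List.mem_cons.mp hz with rfl | hz
      · exact hasym _ _ hb
      · by_cases hzx : before z x = true
        · have h1 := htrans _ _ _ hzx hb
          have h2 := hy z hz
          simp_all
        · simpa using hzx
    · have hb' : before x y = false := by simpa using hb
      simp only [PySem.List.insertBy, hb', Bool.false_eq_true, if_neg, not_false_iff]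
      refine List.pairwise_cons.mpr ⟨?_, ih hys⟩
      intro z hz
      rcases (PySem.List.mem_insertBy before x z ys).mp hz with rfl | hz
      · exact hb'
      · exact hy z hz

lemma foldl_insertBy_pairwise {α : Type} (before : α → α → Bool)
    (hasym : ∀ a b, before a b = true → before b a = false)
    (htrans : ∀ a b c, before a b = true → before b c = true → before a c = true)
    (xs : List α) (acc : List α) (h : acc.Pairwise (fun a b => before b a = false)) :
    (xs.foldl (fun acc x => PySem.List.insertBy before x acc) acc).Pairwise
      (fun a b => before b a = false) := by
  induction xs generalizing acc with
  | nil => simpa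
  | cons x xs ih => exact ih _ (insertBy_pairwise before hasym htrans x acc h)

-- the two ports as explicit insertion sorts
lemma alt_eq_foldl (xs : List (Int × Int)) :
    sort_tile_indices_zigzag_py_alt xs =
      xs.foldl (fun acc x => PySem.List.insertBy zlt x acc) [] := rfl

lemma sortedA_eq_foldl (xs : List (Int × Int)) :
    PySem.List.sorted2 xs (fun t => t.2) (fun t => t.1) =
      xs.foldl (fun acc x => PySem.List.insertBy rlt x acc) [] := rfl

lemma alt_pairwise (xs : List (Int × Int)) :
    (sort_tile_indices_zigzag_py_alt xs).Pairwise Rz := by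
  rw [alt_eq_foldl]
  have h := foldl_insertBy_pairwise zlt zlt_asym zlt_trans xs [] (by simp)
  exact h.imp (fun h => (zlt_false_iff _ _).mp h)

lemma sortedA_pairwise (xs : List (Int × Int)) :
    (PySem.List.sorted2 xs (fun t => t.2) (fun t => t.1)).Pairwise
      (fun a b => a.2 < b.2 ∨ (a.2 = b.2 ∧ a.1 ≤ b.1)) := by
  rw [sortedA_eq_foldl]
  have h := foldl_insertBy_pairwise rlt rlt_asym rlt_trans xs [] (by simp)
  exact h.imp (fun h => (rlt_false_iff _ _).mp h)

-- structure of pvGroupRuns: adjacent groups have distinct keys, every member of a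
-- group carries the group key, groups are nonempty, and the groups concatenate back
lemma groupRuns_struct (s : List (Int × Int)) :
    ((pvGroupRuns s).IsChain (fun g h => g.1 ≠ h.1)) ∧
    (∀ p ∈ pvGroupRuns s, p.2 ≠ [] ∧ ∀ t ∈ p.2, t.2 = p.1) ∧
    ((pvGroupRuns s).flatMap (fun p => p.2) = s) := by
  induction s with
  | nil => simp [pvGroupRuns]
  | cons x xs ih =>
    obtain ⟨hchain, hmem, hflat⟩ := ih
    cases hg : pvGroupRuns xs with
    | nil =>
      rw [hg] at hflat
      simp only [List.flatMap_nil] at hflat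
      simp only [pvGroupRuns, hg]
      refine ⟨by simp, ?_, by simp [← hflat]⟩
      intro p hp
      rcases List.mem_cons.mp hp with rfl | hp
      · refine ⟨by simp, ?_⟩
        intro t ht
        rcases List.mem_cons.mp ht with rfl | ht
        · rfl
        · simp at ht
      · simp at hp
    | cons p rest =>
      obtain ⟨k, g⟩ := p
      rw [hg] at hchain hmem hflat
      by_cases hk : x.2 = k
      · simp only [pvGroupRuns, hg]
        rw [if_pos hk]
        refine ⟨?_, ?_, ?_⟩
        · rcases rest with _ | ⟨q, rest⟩
          · simp
          · rw [List.isChain_cons_cons] at hchain ⊢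
            exact hchain
        · intro p hp
          rcases List.mem_cons.mp hp with rfl | hp
          · refine ⟨by simp, ?_⟩
            intro t ht
            rcases List.mem_cons.mp ht with rfl | ht
            · exact hk
            · exact (hmem (k, g) (List.mem_cons_self)).2 t ht
          · exact hmem p (List.mem_cons_of_mem _ hp)
        · simp only [List.flatMap_cons] at hflat ⊢
          rw [List.cons_append, hflat]
      · simp only [pvGroupRuns, hg]
        rw [if_neg hk]
        refine ⟨?_, ?_, ?_⟩
        · rw [List.isChain_cons_cons]
          exact ⟨hk, hchain⟩
        · intro p hp
          rcases List.mem_cons.mp hp with rfl | hp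
          · refine ⟨by simp, ?_⟩
            intro t ht
            rcases List.mem_cons.mp ht with rfl | ht
            · rfl
            · simp at ht
          · exact hmem p hp
        · simp only [List.flatMap_cons, List.singleton_append] at hflat ⊢
          rw [hflat]

-- two chains combine pointwise
lemma isChain_of_two {α : Type} {R S T : α → α → Prop} (hRT : ∀ a b, R a b → S a b → T a b) :
    ∀ {l : List α}, l.IsChain R → l.IsChain S → l.IsChain T
  | [], _, _ => by simp
  | [_], _, _ => by simp
  | a :: b :: l, hR, hS => by
    rw [List.isChain_cons_cons] at *
    exact ⟨hRT a b hR.1 hS.1, isChain_of_two hRT hR.2 hS.2⟩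

-- permutation of flatMaps from groupwise permutations
lemma flatMap_perm {α β : Type} (l : List β) (f g : β → List α)
    (h : ∀ b ∈ l, (f b).Perm (g b)) : (l.flatMap f).Perm (l.flatMap g) := by
  induction l with
  | nil => simp
  | cons b l ih =>
    simp only [List.flatMap_cons]
    exact (h b (by simp)).append (ih (fun b hb => h b (by simp [hb])))

-- A's foldl-extend loop is a flatMap
lemma foldl_extend_eq_flatMap {α β : Type} (l : List β) (f : β → List α) (acc : List α) :
    l.foldl (fun acc rg => acc ++ f rg) acc = acc ++ l.flatMap f := by
  induction l generalizing acc with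
  | nil => simp
  | cons b l ih => simp [ih, List.append_assoc]

lemma Rz_antisymm (a b : Int × Int) (h1 : Rz a b) (h2 : Rz b a) : a = b := by
  unfold Rz at h1 h2
  have hr : a.2 = b.2 := by omega
  have hs : zsig a = zsig b := by omega
  have hc : a.1 = b.1 := by
    unfold zsig at hs
    rw [hr] at hs
    split at hs <;> omega
  exact Prod.ext_iff.mpr ⟨hc, hr⟩

-- A's output, written as a flatMap over the groups
lemma A_eq_flatMap (xs : List (Int × Int)) :
    sort_tile_indices_zigzag_py xs =
      (pvGroupRuns (PySem.List.sorted2 xs (fun t => t.2) (fun t => t.1))).flatMap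
        (fun rg => if PySem.Int.mod rg.1 2 = 1 then rg.2.reverse else rg.2) := by
  simp only [sort_tile_indices_zigzag_py]
  rw [foldl_extend_eq_flatMap]
  simp

lemma A_perm (xs : List (Int × Int)) : (sort_tile_indices_zigzag_py xs).Perm xs := by
  rw [A_eq_flatMap]
  have hflat := (groupRuns_struct (PySem.List.sorted2 xs (fun t => t.2) (fun t => t.1))).2.2
  have h2 : ((pvGroupRuns (PySem.List.sorted2 xs (fun t => t.2) (fun t => t.1))).flatMap
      (fun p => p.2)).Perm xs := by
    rw [hflat]
    exact PySem.List.sorted2_perm xs _ _ _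
  refine List.Perm.trans (flatMap_perm _ _ (fun p => p.2) ?_) h2
  intro p _
  split
  · exact List.reverse_perm _
  · exact List.Perm.refl _

-- zigzag sortedness of A's output
lemma A_pairwise (xs : List (Int × Int)) : (sort_tile_indices_zigzag_py xs).Pairwise Rz := by
  rw [A_eq_flatMap]
  set s := PySem.List.sorted2 xs (fun t => t.2) (fun t => t.1) with hsdef
  obtain ⟨hchain, hmem, hflat⟩ := groupRuns_struct s
  have hsp : s.Pairwise (fun a b => a.2 < b.2 ∨ (a.2 = b.2 ∧ a.1 ≤ b.1)) := sortedA_pairwise xs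
  rw [← hflat, List.flatMap_def, List.pairwise_flatten] at hsp
  obtain ⟨hin, hcross⟩ := hsp
  rw [List.pairwise_map] at hcross
  -- group keys are pairwise ≤ …
  have hle : (pvGroupRuns s).Pairwise (fun g h => g.1 ≤ h.1) := by
    refine hcross.imp_of_mem ?_
    intro g h hg hh hr
    obtain ⟨hgne, hgk⟩ := hmem g hg
    obtain ⟨hhne, hhk⟩ := hmem h hh
    obtain ⟨a, ha⟩ := List.exists_mem_of_ne_nil _ hgne
    obtain ⟨b, hb⟩ := List.exists_mem_of_ne_nil _ hhne
    have h0 := hr a ha b hb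
    have h1 := hgk a ha
    have h2 := hhk b hb
    omega
  -- … and in fact pairwise <, since adjacent group keys differ
  have hlt : (pvGroupRuns s).Pairwise (fun g h => g.1 < h.1) := by
    haveI : Trans (fun (g h : Int × List (Int × Int)) => g.1 < h.1)
        (fun (g h : Int × List (Int × Int)) => g.1 < h.1)
        (fun (g h : Int × List (Int × Int)) => g.1 < h.1) :=
      ⟨fun h1 h2 => lt_trans h1 h2⟩
    rw [← List.isChain_iff_pairwise]
    exact isChain_of_two (fun a b h1 h2 => lt_of_le_of_ne h1 h2) hle.isChain hchain
  rw [List.flatMap_def, List.pairwise_flatten]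
  constructor
  · -- each transformed group is Rz-sorted
    intro l hl
    rw [List.mem_map] at hl
    obtain ⟨g, hg, rfl⟩ := hl
    obtain ⟨-, hgk⟩ := hmem g hg
    have hgp := hin g.2 (List.mem_map_of_mem hg)
    by_cases hodd : PySem.Int.mod g.1 2 = 1
    · rw [if_pos hodd, List.pairwise_reverse]
      refine hgp.imp_of_mem ?_
      intro a b ha hb hr
      have hka := hgk a ha
      have hkb := hgk b hb
      right
      refine ⟨by omega, ?_⟩
      unfold zsig
      rw [hka, hkb, hodd]
      rw [if_neg (by norm_num : ¬(1:ℤ) = 0), if_neg (by norm_num : ¬(1:ℤ) = 0)]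
      omega
    · have heven : PySem.Int.mod g.1 2 = 0 := by
        rcases PySem.Int.mod_two_eq g.1 with h | h
        · exact h
        · exact absurd h hodd
      rw [if_neg hodd]
      refine hgp.imp_of_mem ?_
      intro a b ha hb hr
      have hka := hgk a ha
      have hkb := hgk b hb
      right
      refine ⟨by omega, ?_⟩
      unfold zsig
      rw [hka, hkb, heven]
      rw [if_pos rfl, if_pos rfl]
      omega
  · -- across groups: strictly smaller row ⇒ Rz
    rw [List.pairwise_map]
    refine hlt.imp_of_mem ?_
    intro g h hg hh hklt x hx y hy
    have hxg : x ∈ g.2 := by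
      revert hx; split
      · intro hx; exact List.mem_reverse.mp hx
      · exact id
    have hyh : y ∈ h.2 := by
      revert hy; split
      · intro hy; exact List.mem_reverse.mp hy
      · exact id
    left
    have h1 := (hmem g hg).2 x hxg
    have h2 := (hmem h hh).2 y hyh
    omega

lemma main_eq (xs : List (Int × Int)) :
    sort_tile_indices_zigzag_py xs = sort_tile_indices_zigzag_py_alt xs := by
  refine List.Perm.eq_of_pairwise ?_ (A_pairwise xs) (alt_pairwise xs) ?_
  · intro a b _ _ h1 h2; exact Rz_antisymm a b h1 h2
  · exact (A_perm xs).trans (PySem.List.sorted2_perm xs _ _ _).symm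

-- ===== VERDICT (by name: the statement is the Claim_ definition above) =====
theorem sort_tile_indices_zigzag_py_spec : Claim_equal_sort_tile_indices_zigzag_py := by
  intro xs _
  unfold Spec_sort_tile_indices_zigzag_py
  exact main_eq xs
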